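-- pv_equiv track=rewrite | github.com/Takuma-ux/AWA | nurse/main_program/awa.py | remove_duplicate_numbers_with_ret
-- ===== SOURCE A (Python) =====
-- def remove_duplicate_numbers_with_ret(text):
--     # 連続する重複した数字を1回のみ表示する
--     # ただし、末尾の "\r" は除外する
--     cleaned_text = ''
--     prev_char = ''
--     for char in text:
--         if char.isdigit() and char == prev_char:
--             continue
--         cleaned_text += char
--         prev_char = char
--     # 末尾の "\r" を追加
--     if text.endswith('\r'):
--         cleaned_text += '\r'
--     return cleaned_text.strip()
-- ===== SOURCE B (Python) =====
-- def remove_duplicate_numbers_with_ret(text):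
--     # run-based rewrite: split into maximal runs of equal chars,
--     # emit a digit run as one char, any other run verbatim, then strip
--     pieces = []
--     i, n = 0, len(text)
--     while i < n:
--         j = i
--         while j < n and text[j] == text[i]:
--             j += 1
--         pieces.append(text[i] if text[i].isdigit() else text[i:j])
--         i = j
--     return ''.join(pieces).strip()
-- ===== Notes on version B (the rewrite author's own statement) =====
-- stated objective: idiomatic
-- what changed: B splits the string into maximal runs of equal characters with a two-pointer scan, emits one character per digit run and any other run verbatim, then joins and strips once, dropping A's dead trailing-carriage-return branch.
import Mathlib
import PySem

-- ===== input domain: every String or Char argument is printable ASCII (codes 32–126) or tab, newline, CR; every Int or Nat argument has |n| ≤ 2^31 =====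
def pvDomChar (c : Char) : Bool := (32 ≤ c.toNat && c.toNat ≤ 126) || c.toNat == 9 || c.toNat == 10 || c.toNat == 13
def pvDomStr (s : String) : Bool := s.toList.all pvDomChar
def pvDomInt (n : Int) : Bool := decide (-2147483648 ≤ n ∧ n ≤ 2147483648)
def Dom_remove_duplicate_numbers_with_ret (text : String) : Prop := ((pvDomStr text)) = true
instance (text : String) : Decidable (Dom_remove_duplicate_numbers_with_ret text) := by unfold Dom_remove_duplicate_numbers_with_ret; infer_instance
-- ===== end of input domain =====

-- B rewrites A's char-by-char dedup loop as a run-splitting scan (emit a digit run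
-- as one char, any other run verbatim) and drops A's dead trailing-carriage-return branch;
-- objective: simpler/idiomatic, same return value.

-- ===== PORT A =====
-- the for-loop of A: state = (cleaned_text, prev_char); prev_char = '' modelled as none
def pvLoopA : List Char → List Char → Option Char → List Char
  | [], cleaned, _ => cleaned
  | c :: rest, cleaned, prev =>
    if PySem.Chars.isdigit c && prev == some c then pvLoopA rest cleaned prev
    else pvLoopA rest (cleaned ++ [c]) (some c)

def remove_duplicate_numbers_with_ret (text : String) : String :=
  let cleaned := pvLoopA text.toList [] none
  let cleaned := if PySem.Str.endswith text "\r" then cleaned ++ ['\r'] else cleaned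
  PySem.Str.strip (String.ofList cleaned)

-- ===== PORT B =====
-- inner while loop of B: length of the run of c at the front of the list, and the rest
def pvTakeRun (c : Char) : List Char → Nat × List Char
  | [] => (0, [])
  | x :: xs => if x = c then ((pvTakeRun c xs).1 + 1, (pvTakeRun c xs).2) else (0, x :: xs)

theorem pvTakeRun_len_le (c : Char) : ∀ l : List Char, (pvTakeRun c l).2.length ≤ l.length := by
  intro l
  induction l with
  | nil => simp [pvTakeRun]
  | cons x xs ih =>
    simp only [pvTakeRun]
    split
    · exact Nat.le_succ_of_le ih
    · simp

-- outer while loop of B: emit a piece per run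
def pvPieces : List Char → List Char
  | [] => []
  | c :: rest =>
    (if PySem.Chars.isdigit c then [c] else List.replicate ((pvTakeRun c rest).1 + 1) c)
      ++ pvPieces (pvTakeRun c rest).2
  termination_by l => l.length
  decreasing_by
    simpa using Nat.lt_succ_of_le (pvTakeRun_len_le c rest)

def remove_duplicate_numbers_with_ret_alt (text : String) : String :=
  PySem.Str.strip (String.ofList (pvPieces text.toList))

-- ===== PRECONDITION & SPEC =====
def Spec_remove_duplicate_numbers_with_ret (text : String) (out : String) : Prop := out = remove_duplicate_numbers_with_ret_alt text
instance (text : String) (out : String) : Decidable (Spec_remove_duplicate_numbers_with_ret text out) := by unfold Spec_remove_duplicate_numbers_with_ret; infer_instance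

-- ===== CLAIM (what is proved, stated in full; the proofs are below) =====
def Claim_equal_remove_duplicate_numbers_with_ret : Prop := ∀ (text : String), Dom_remove_duplicate_numbers_with_ret text → Spec_remove_duplicate_numbers_with_ret text (remove_duplicate_numbers_with_ret text)

-- ===== LEMMAS AND PROOFS =====

-- A's loop without the accumulator
def pvCore : List Char → Option Char → List Char
  | [], _ => []
  | c :: rest, prev =>
    if PySem.Chars.isdigit c && prev == some c then pvCore rest prev
    else c :: pvCore rest (some c)

theorem pvLoopA_eq_core : ∀ (l : List Char) (acc : List Char) (prev : Option Char),
    pvLoopA l acc prev = acc ++ pvCore l prev := by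
  intro l
  induction l with
  | nil => simp [pvLoopA, pvCore]
  | cons c rest ih =>
    intro acc prev
    simp only [pvLoopA, pvCore]
    split
    · exact ih acc prev
    · rw [ih (acc ++ [c]) (some c)]; simp

theorem pvTakeRun_decomp (c : Char) : ∀ l : List Char,
    l = List.replicate (pvTakeRun c l).1 c ++ (pvTakeRun c l).2 := by
  intro l
  induction l with
  | nil => simp [pvTakeRun]
  | cons x xs ih =>
    simp only [pvTakeRun]
    split
    · rename_i h; subst h; simpa [List.replicate_succ] using ih
    · simp

theorem pvTakeRun_head (c : Char) : ∀ (l : List Char) (h : Char),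
    (pvTakeRun c l).2.head? = some h → h ≠ c := by
  intro l
  induction l with
  | nil => simp [pvTakeRun]
  | cons x xs ih =>
    intro h
    simp only [pvTakeRun]
    split
    · exact ih h
    · rename_i hx; simp only [List.head?_cons, Option.some.injEq]
      rintro rfl; exact hx

theorem pvCore_replicate_digit (c : Char) (hc : PySem.Chars.isdigit c = true) :
    ∀ (n : Nat) (r : List Char), pvCore (List.replicate n c ++ r) (some c) = pvCore r (some c) := by
  intro n
  induction n with
  | zero => simp
  | succ m ih => intro r; simp [List.replicate_succ, pvCore, hc, ih]

theorem pvCore_replicate_nondigit (c : Char) (hc : PySem.Chars.isdigit c = false) :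
    ∀ (n : Nat) (r : List Char),
      pvCore (List.replicate n c ++ r) (some c) = List.replicate n c ++ pvCore r (some c) := by
  intro n
  induction n with
  | zero => simp
  | succ m ih => intro r; simp [List.replicate_succ, pvCore, hc, ih]

theorem pvCore_eq_pieces : ∀ (l : List Char) (prev : Option Char),
    (∀ h, l.head? = some h → prev = some h → PySem.Chars.isdigit h = false) →
    pvCore l prev = pvPieces l := by
  intro l
  induction l using pvPieces.induct with
  | case1 => intro prev _; simp [pvCore, pvPieces]
  | case2 c rest ih =>
    intro prev hprev
    have hcond : (PySem.Chars.isdigit c && prev == some c) = false := by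
      by_cases hp : prev = some c
      · subst hp; simp [hprev c rfl rfl]
      · simp [hp]
    have hhead : ∀ h, (pvTakeRun c rest).2.head? = some h → some c = some h →
        PySem.Chars.isdigit h = false := by
      intro h hh he
      injection he with he
      exact (pvTakeRun_head c rest h hh he.symm).elim
    simp only [pvCore, hcond, Bool.false_eq_true, if_false, pvPieces]
    by_cases hd : PySem.Chars.isdigit c = true
    · have h1 : pvCore rest (some c) = pvCore (pvTakeRun c rest).2 (some c) := by
        conv_lhs => rw [pvTakeRun_decomp c rest]
        exact pvCore_replicate_digit c hd _ _
      rw [h1, ih (some c) hhead]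
      simp [hd]
    · have hd' : PySem.Chars.isdigit c = false := by simpa using hd
      have h1 : pvCore rest (some c)
          = List.replicate (pvTakeRun c rest).1 c ++ pvCore (pvTakeRun c rest).2 (some c) := by
        conv_lhs => rw [pvTakeRun_decomp c rest]
        exact pvCore_replicate_nondigit c hd' _ _
      rw [h1, ih (some c) hhead]
      simp [hd', List.replicate_succ]

theorem lstrip_append (a b : List Char) :
    PySem.Chars.lstrip (a ++ b) =
      if PySem.Chars.lstrip a = [] then PySem.Chars.lstrip b else PySem.Chars.lstrip a ++ b := by
  simp only [PySem.Chars.lstrip, List.dropWhile_append]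
  split <;> rename_i h <;> simp_all [List.isEmpty_iff]

theorem rstrip_append_cr (y : List Char) :
    PySem.Chars.rstrip (y ++ ['\r']) = PySem.Chars.rstrip y := by
  simp [PySem.Chars.rstrip, PySem.Chars.isspace]

theorem strip_append_cr (x : List Char) :
    PySem.Chars.strip (x ++ ['\r']) = PySem.Chars.strip x := by
  simp only [PySem.Chars.strip, lstrip_append]
  split
  · rename_i h
    rw [h]
    have : PySem.Chars.lstrip ['\r'] = [] := by decide
    rw [this]
  · exact rstrip_append_cr _

-- ===== VERDICT (by name: the statement is the Claim_ definition above) =====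
theorem remove_duplicate_numbers_with_ret_spec : Claim_equal_remove_duplicate_numbers_with_ret := by
  intro text _
  unfold Spec_remove_duplicate_numbers_with_ret
  unfold remove_duplicate_numbers_with_ret remove_duplicate_numbers_with_ret_alt
  have hcore : pvLoopA text.toList [] none = pvPieces text.toList := by
    rw [pvLoopA_eq_core]
    simp only [List.nil_append]
    exact pvCore_eq_pieces text.toList none (by intro h _ hn; cases hn)
  simp only [hcore]
  split
  · simp only [PySem.Str.strip, String.toList_ofList, strip_append_cr]
  · rfl
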